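-- pv_equiv track=rewrite | github.com/robertwaltos/file_manager | src/cloud/google_drive.py | _group_duplicates
-- ===== SOURCE A (Python) =====
-- def _group_duplicates(files: list[dict]) -> list[list[dict]]:
--     buckets: dict[tuple[str, str], list[dict]] = {}
--     for item in files:
--         size = item.get("size")
--         key = None
--         if item.get("md5Checksum"):
--             key = ("md5", item["md5Checksum"])
--         elif item.get("name") and size:
--             key = ("name_size", f"{item['name']}::{size}")
--         if key is None:
--             continue
--         buckets.setdefault(key, []).append(item)
--     return [group for group in buckets.values() if len(group) > 1]
-- ===== SOURCE B (Python) =====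
-- def _group_duplicates(files: list[dict]) -> list[list[dict]]:
--     # First-occurrence scan: tag each groupable item with its key, then for each
--     # key's first position collect its whole group from the tagged list.
--     keyed = []
--     for item in files:
--         md5 = item.get("md5Checksum")
--         if md5:
--             keyed.append((("md5", md5), item))
--         else:
--             name = item.get("name")
--             size = item.get("size")
--             if name and size:
--                 keyed.append((("name_size", f"{name}::{size}"), item))
--     groups = []
--     seen = []
--     for k, _ in keyed:
--         if k in seen:
--             continue
--         seen.append(k)
--         group = [it for k2, it in keyed if k2 == k]
--         if len(group) > 1:
--             groups.append(group)
--     return groups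
-- ===== Notes on version B (the rewrite author's own statement) =====
-- stated objective: alternative
-- what changed: A builds a dict of buckets via setdefault-append and then filters its values; B uses no dict at all: it tags each groupable item with its key in one pass, then scans the tagged list collecting, at each key's first occurrence, the whole group by filtering the tagged list.
import Mathlib
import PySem

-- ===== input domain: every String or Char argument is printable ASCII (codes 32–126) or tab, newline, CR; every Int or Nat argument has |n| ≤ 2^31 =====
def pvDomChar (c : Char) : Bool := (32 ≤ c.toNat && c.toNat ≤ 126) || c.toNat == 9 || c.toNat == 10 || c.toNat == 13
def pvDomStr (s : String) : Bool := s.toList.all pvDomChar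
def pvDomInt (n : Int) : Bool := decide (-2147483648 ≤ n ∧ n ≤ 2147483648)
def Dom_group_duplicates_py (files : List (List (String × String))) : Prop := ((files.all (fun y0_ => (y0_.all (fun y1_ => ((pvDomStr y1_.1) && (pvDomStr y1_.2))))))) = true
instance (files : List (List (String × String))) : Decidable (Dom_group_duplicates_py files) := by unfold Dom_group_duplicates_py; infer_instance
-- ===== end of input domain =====

-- B replaces A's setdefault-dict build-then-filter by a dict-free first-occurrence scan
-- over a key-tagged list (alternative decomposition, same observable result).

-- ===== PORT A =====
-- item.get(k) on a dict given as an association list: first match.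
def pvGetA (item : List (String × String)) (k : String) : Option String :=
  (PySem.Dict.mk item).get? k

-- Python truthiness of `item.get(k)`: some nonempty string.
def pvTruthyA : Option String → Bool
  | none => false
  | some s => !(s == "")

-- A's loop body: compute the key, skip if None, else buckets.setdefault(key, []).append(item)
def pvStepA (b : PySem.Dict (String × String) (List (List (String × String))))
    (item : List (String × String)) : PySem.Dict (String × String) (List (List (String × String))) :=
  let size := pvGetA item "size"
  let key : Option (String × String) :=
    if pvTruthyA (pvGetA item "md5Checksum") then
      some ("md5", (pvGetA item "md5Checksum").getD "")
    else if pvTruthyA (pvGetA item "name") && pvTruthyA size then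
      some ("name_size", (pvGetA item "name").getD "" ++ "::" ++ size.getD "")
    else none
  match key with
  | none => b                                        -- continue
  | some k => b.modify k [] (fun g => g ++ [item])   -- setdefault(key, []).append(item)

def group_duplicates_py (files : List (List (String × String))) : List (List (List (String × String))) :=
  let buckets := files.foldl pvStepA PySem.Dict.empty
  buckets.values.filter (fun group => decide (1 < group.length))

-- ===== PORT B =====
-- body of Source B's first loop: tag the item with its key, or skip it
def pvStepB1 (acc : List ((String × String) × List (String × String)))
    (item : List (String × String)) : List ((String × String) × List (String × String)) :=
  let md5 := pvGetA item "md5Checksum"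
  if pvTruthyA md5 then
    acc ++ [(("md5", md5.getD ""), item)]
  else
    let name := pvGetA item "name"
    let size := pvGetA item "size"
    if pvTruthyA name && pvTruthyA size then
      acc ++ [(("name_size", name.getD "" ++ "::" ++ size.getD ""), item)]
    else acc

def pvKeyedLoop (files : List (List (String × String))) :
    List ((String × String) × List (String × String)) :=
  files.foldl pvStepB1 []

-- body of Source B's second loop; state = (seen, groups)
def pvStepB2 (keyed : List ((String × String) × List (String × String)))
    (st : List (String × String) × List (List (List (String × String))))
    (p : (String × String) × List (String × String)) :
    List (String × String) × List (List (List (String × String))) :=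
  if st.1.contains p.1 then st          -- continue
  else
    let group := (keyed.filter (fun q => q.1 == p.1)).map (·.2)
    (st.1 ++ [p.1], if 1 < group.length then st.2 ++ [group] else st.2)

def group_duplicates_py_alt (files : List (List (String × String))) : List (List (List (String × String))) :=
  let keyed := pvKeyedLoop files
  (keyed.foldl (pvStepB2 keyed) ([], [])).2

-- ===== PRECONDITION & SPEC =====
def Spec_group_duplicates_py (files : List (List (String × String))) (out : List (List (List (String × String)))) : Prop := out = group_duplicates_py_alt files
instance (files : List (List (String × String))) (out : List (List (List (String × String)))) : Decidable (Spec_group_duplicates_py files out) := by unfold Spec_group_duplicates_py; infer_instance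

-- ===== CLAIM (what is proved, stated in full; the proofs are below) =====
def Claim_equal_group_duplicates_py : Prop := ∀ (files : List (List (String × String))), Dom_group_duplicates_py files → Spec_group_duplicates_py files (group_duplicates_py files)

-- ===== LEMMAS AND PROOFS =====

-- the key tag of one item (common normal form for both ports)
def pvKOf (item : List (String × String)) : List ((String × String) × List (String × String)) :=
  if pvTruthyA (pvGetA item "md5Checksum") then
    [(("md5", (pvGetA item "md5Checksum").getD ""), item)]
  else if pvTruthyA (pvGetA item "name") && pvTruthyA (pvGetA item "size") then
    [(("name_size", (pvGetA item "name").getD "" ++ "::" ++ (pvGetA item "size").getD ""), item)]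
  else []

-- the keys B's second loop processes: first occurrences, in order
def pvFirstKeys : List ((String × String) × List (String × String)) →
    List (String × String) → List (String × String)
  | [], _ => []
  | p :: ps, seen =>
    if seen.contains p.1 then pvFirstKeys ps seen
    else p.1 :: pvFirstKeys ps (seen ++ [p.1])

theorem pvStepB1_eq (acc : List ((String × String) × List (String × String)))
    (item : List (String × String)) : pvStepB1 acc item = acc ++ pvKOf item := by
  cases h1 : pvTruthyA (pvGetA item "md5Checksum") <;>
    cases h2 : (pvTruthyA (pvGetA item "name") && pvTruthyA (pvGetA item "size")) <;>
      simp [pvStepB1, pvKOf, h1, h2]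

theorem pvStepA_eq (b : PySem.Dict (String × String) (List (List (String × String))))
    (item : List (String × String)) :
    pvStepA b item = (pvKOf item).foldl (fun b p => b.modify p.1 [] (fun g => g ++ [p.2])) b := by
  cases h1 : pvTruthyA (pvGetA item "md5Checksum") <;>
    cases h2 : (pvTruthyA (pvGetA item "name") && pvTruthyA (pvGetA item "size")) <;>
      simp [pvStepA, pvKOf, h1, h2]

theorem pvKeyedLoop_eq (files : List (List (String × String))) :
    pvKeyedLoop files = files.flatMap pvKOf := by
  suffices h : ∀ (fs : List (List (String × String))) acc,
      fs.foldl pvStepB1 acc = acc ++ fs.flatMap pvKOf by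
    simpa using h files []
  intro fs
  induction fs with
  | nil => intro acc; simp
  | cons item rest ih =>
    intro acc
    rw [List.foldl_cons, pvStepB1_eq, ih, List.flatMap_cons, List.append_assoc]

theorem pvBuckets_eq (files : List (List (String × String)))
    (d : PySem.Dict (String × String) (List (List (String × String)))) :
    files.foldl pvStepA d
    = (files.flatMap pvKOf).foldl (fun b p => b.modify p.1 [] (fun g => g ++ [p.2])) d := by
  induction files generalizing d with
  | nil => rfl
  | cons item rest ih =>
    rw [List.foldl_cons, pvStepA_eq, ih, List.flatMap_cons, List.foldl_append]

-- Set.update with a `seen` prefix is exactly B's first-occurrence key scan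
theorem pvFirstKeys_update (ps : List ((String × String) × List (String × String)))
    (seen : List (String × String)) :
    PySem.Set.update seen (ps.map (·.1)) = seen ++ pvFirstKeys ps seen := by
  induction ps generalizing seen with
  | nil => simp [pvFirstKeys, PySem.Set.update_nil]
  | cons p rest ih =>
    simp only [List.map_cons, PySem.Set.update_cons, pvFirstKeys]
    by_cases h : seen.contains p.1 = true
    · have hm : p.1 ∈ seen := by simpa using h
      rw [PySem.Set.add_of_mem hm, if_pos h, ih]
    · have hm : p.1 ∉ seen := by simpa using h
      rw [PySem.Set.add_of_not_mem hm, if_neg h, ih, List.append_assoc]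
      rfl

-- B's second loop collects, in first-occurrence order, the big groups
theorem pvLoopB (keyed ps : List ((String × String) × List (String × String)))
    (seen : List (String × String)) (gs : List (List (List (String × String)))) :
    (ps.foldl (pvStepB2 keyed) (seen, gs)).2
    = gs ++ ((pvFirstKeys ps seen).map
        (fun k => (keyed.filter (fun q => q.1 == k)).map (·.2))).filter
        (fun x => decide (1 < x.length)) := by
  induction ps generalizing seen gs with
  | nil => simp [pvFirstKeys]
  | cons p rest ih =>
    rw [List.foldl_cons]
    by_cases h : seen.contains p.1 = true
    · rw [show pvStepB2 keyed (seen, gs) p = (seen, gs) by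
        simp [pvStepB2]; simpa using h]
      rw [ih]
      simp only [pvFirstKeys, if_pos h]
    · rw [show pvStepB2 keyed (seen, gs) p
          = (seen ++ [p.1],
             if 1 < ((keyed.filter (fun q => q.1 == p.1)).map (·.2)).length then
               gs ++ [(keyed.filter (fun q => q.1 == p.1)).map (·.2)]
             else gs) by simp [pvStepB2]; simpa using h]
      rw [ih]
      simp only [pvFirstKeys, if_neg h, List.map_cons, List.filter_cons]
      by_cases hl : 1 < (keyed.filter (fun q => q.1 == p.1)).length
      · simp [hl, List.append_assoc]
      · simp [hl]

theorem group_duplicates_py_eq (files : List (List (String × String))) :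
    group_duplicates_py files = group_duplicates_py_alt files := by
  show (files.foldl pvStepA PySem.Dict.empty).values.filter (fun group => decide (1 < group.length))
      = ((pvKeyedLoop files).foldl (pvStepB2 (pvKeyedLoop files)) ([], [])).2
  rw [pvBuckets_eq, pvKeyedLoop_eq, pvLoopB]
  set L := files.flatMap pvKOf with hL
  have hkeys : ((L.foldl (fun b p => b.modify p.1 [] (fun g => g ++ [p.2]))
      PySem.Dict.empty).keys) = PySem.Set.ofList (L.map (·.1)) := by
    rw [PySem.Dict.keys_foldl_modify_key]
    simp [PySem.Set.update_nil_left]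
  have hnd : ((L.foldl (fun b p => b.modify p.1 [] (fun g => g ++ [p.2]))
      PySem.Dict.empty).keys).Nodup := by
    rw [hkeys]; exact PySem.Set.nodup_ofList _
  rw [PySem.Dict.values_eq_map_keys _ hnd [], hkeys]
  have hfirst : PySem.Set.ofList (L.map (·.1)) = pvFirstKeys L [] := by
    have h := pvFirstKeys_update L []
    rwa [PySem.Set.update_nil_left, List.nil_append] at h
  rw [hfirst, List.nil_append]
  congr 1
  refine List.map_congr_left (fun k _ => ?_)
  rw [PySem.Dict.getD_foldl_modify_append]
  simp

-- ===== VERDICT (by name: the statement is the Claim_ definition above) =====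
theorem group_duplicates_py_spec : Claim_equal_group_duplicates_py := by
  intro files _
  exact group_duplicates_py_eq files
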